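-- pv_equiv track=rewrite | github.com/anthonyc0011/court-vision | excel_quiz_mac.py | get_rank_from_xp
-- ===== SOURCE A (Python) =====
-- def get_rank_from_xp(xp):
--     tiers = [
--         (0, "Rookie"),
--         (150, "Starter"),
--         (350, "All-Conference"),
--         (700, "All-American"),
--         (1200, "Legend"),
--     ]
--     rank = "Rookie"
--     for threshold, name in tiers:
--         if xp >= threshold:
--             rank = name
--     return rank
-- ===== SOURCE B (Python) =====
-- _THRESHOLDS = [0, 150, 350, 700, 1200]
-- _NAMES = ["Rookie", "Starter", "All-Conference", "All-American", "Legend"]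
--
--
-- def get_rank_from_xp(xp):
--     # binary search: rightmost threshold <= xp (bisect_right), clamped at 0
--     lo, hi = 0, len(_THRESHOLDS)
--     while lo < hi:
--         mid = (lo + hi) // 2
--         if xp < _THRESHOLDS[mid]:
--             hi = mid
--         else:
--             lo = mid + 1
--     i = lo - 1
--     if i < 0:
--         i = 0
--     return _NAMES[i]
-- ===== Notes on version B (the rewrite author's own statement) =====
-- stated objective: alternative
-- what changed: Replaces the linear last-match scan over (threshold,name) pairs with a binary search (bisect_right) into a sorted threshold table, indexing a parallel name list with the clamped result.
import Mathlib
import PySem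

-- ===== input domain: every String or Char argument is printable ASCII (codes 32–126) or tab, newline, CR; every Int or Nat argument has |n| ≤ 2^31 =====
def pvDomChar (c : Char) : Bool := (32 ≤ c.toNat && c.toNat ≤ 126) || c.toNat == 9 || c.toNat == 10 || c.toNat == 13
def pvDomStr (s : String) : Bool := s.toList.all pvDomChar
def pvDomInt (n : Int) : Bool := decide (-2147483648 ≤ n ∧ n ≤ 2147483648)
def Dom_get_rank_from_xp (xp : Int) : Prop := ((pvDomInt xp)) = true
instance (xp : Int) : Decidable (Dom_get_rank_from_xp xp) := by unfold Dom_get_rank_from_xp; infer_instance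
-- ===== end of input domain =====

-- B replaces A's linear last-match scan with a binary search into a sorted threshold
-- table plus a parallel name list (alternative decomposition; same result).

-- ===== PORT A =====
-- the tiers list of A, literally
def pvTiersA : List (Int × String) :=
  [(0, "Rookie"), (150, "Starter"), (350, "All-Conference"), (700, "All-American"), (1200, "Legend")]

def get_rank_from_xp (xp : Int) : String :=
  pvTiersA.foldl (fun rank tn => if xp ≥ tn.1 then tn.2 else rank) "Rookie"

-- ===== PORT B =====
def pvThresholds : List Int := [0, 150, 350, 700, 1200]
def pvNames : List String := ["Rookie", "Starter", "All-Conference", "All-American", "Legend"]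

-- Source B's while-loop; lo/hi are Nat (always non-negative list indices in Source B, so
-- Nat `/ 2` matches Python's `// 2` and `getD` never hits its default)
def pvBisect (xp : Int) (lo hi : Nat) : Nat :=
  if lo < hi then
    let mid := (lo + hi) / 2
    if xp < pvThresholds.getD mid 0 then pvBisect xp lo mid
    else pvBisect xp (mid + 1) hi
  else lo
termination_by hi - lo
decreasing_by all_goals omega

def get_rank_from_xp_alt (xp : Int) : String :=
  let lo := pvBisect xp 0 pvThresholds.length
  let i : Int := (lo : Int) - 1
  let i := if i < 0 then 0 else i
  pvNames.getD i.toNat "Rookie"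

-- ===== PRECONDITION & SPEC =====
def Spec_get_rank_from_xp (xp : Int) (out : String) : Prop := out = get_rank_from_xp_alt xp
instance (xp : Int) (out : String) : Decidable (Spec_get_rank_from_xp xp out) := by unfold Spec_get_rank_from_xp; infer_instance

-- ===== CLAIM (what is proved, stated in full; the proofs are below) =====
def Claim_equal_get_rank_from_xp : Prop := ∀ (xp : Int), Dom_get_rank_from_xp xp → Spec_get_rank_from_xp xp (get_rank_from_xp xp)

-- ===== LEMMAS AND PROOFS =====
-- ===== VERDICT (by name: the statement is the Claim_ definition above) =====
theorem get_rank_from_xp_spec : Claim_equal_get_rank_from_xp := by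
  intro xp _
  show get_rank_from_xp xp = get_rank_from_xp_alt xp
  simp only [get_rank_from_xp, get_rank_from_xp_alt, pvTiersA, List.foldl]
  simp [pvBisect.eq_def, pvThresholds, pvNames]
  split_ifs <;> first | rfl | omega
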